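-- pv_equiv track=rewrite | github.com/95346725/MFF_Python_Exercises | 17DominoRecursion/Domino.py | najdi
-- ===== SOURCE A (Python) =====
-- def najdi(seznamKostek, tempList):
--     maximum = len(tempList)
--
--     for pozice, domino in enumerate(seznamKostek):
--         if maximum == len(seznamKostek) + len(tempList): #mame nejdelsi
--             break
--
--         zbyvajici = seznamKostek[:pozice] + seznamKostek[pozice+1:] #vyjmuti stavajiciho kousku
--
--         if tempList:
--             obraceneDomino = domino[::-1]
--             head, tail = tempList[0], tempList[-1]
--             ##pripojime k zacatku
--             if domino[1] == head[0]:
--                 maximum = max(najdi(zbyvajici, [domino] + tempList), maximum) #update maxima, pokud je maximum z rekurze vetsi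
--             elif obraceneDomino[1] == head[0]:
--                 maximum = max(najdi(zbyvajici, [obraceneDomino] + tempList), maximum)
--             #pripojime ke konci
--             elif domino[0] == tail[1]:
--                 maximum = max(najdi(zbyvajici, tempList + [domino]), maximum)
--             elif obraceneDomino[0] == tail[1]:
--                 maximum = max(najdi(zbyvajici, tempList + [obraceneDomino]), maximum)
--         else:
--             maximum = max(najdi(zbyvajici, [domino]), maximum) #nezaradili jsme domino, zkusime ho pouzit jak novy zacatek
--
--     return maximum
-- ===== SOURCE B (Python) =====
-- def najdi(seznamKostek, tempList):
--     if not seznamKostek: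
--         return len(tempList)
--     quads = [(d[0], d[1], d[-1], d[-2]) for d in seznamKostek]
--     n = len(seznamKostek)
--     memo = {}
--
--     def f(avail, head0, tail1, tlen, nav):
--         key = (avail, head0, tail1)
--         if key in memo:
--             return memo[key]
--         best = tlen
--         bound = tlen + nav
--         for i, (a, b, y, x) in enumerate(quads):
--             if best == bound:
--                 break
--             if not (avail >> i) & 1:
--                 continue
--             nxt = avail ^ (1 << i)
--             if b == head0:
--                 best = max(f(nxt, a, tail1, tlen + 1, nav - 1), best)
--             elif x == head0:
--                 best = max(f(nxt, y, tail1, tlen + 1, nav - 1), best)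
--             elif a == tail1:
--                 best = max(f(nxt, head0, b, tlen + 1, nav - 1), best)
--             elif y == tail1:
--                 best = max(f(nxt, head0, x, tlen + 1, nav - 1), best)
--         memo[key] = best
--         return best
--
--     full = (1 << n) - 1
--     if tempList:
--         return f(full, tempList[0][0], tempList[-1][1], len(tempList), n)
--     best = 0
--     for i, (a, b, y, x) in enumerate(quads):
--         if best == n:
--             break
--         best = max(best, f(full ^ (1 << i), a, b, 1, n - 1))
--     return best
-- ===== Notes on version B (the rewrite author's own statement) =====
-- stated objective: alternative
-- what changed: Replaces A's recursion over list slices (copying the remaining list and the growing chain at every step) with a memoized bitmask search whose state is (set of unused dominoes, chain head value, chain tail value), so equal search states are solved once.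
-- outside the precondition, e.g. on najdi([(5,)], []): A returns 1, B raises IndexError
import Mathlib
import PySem

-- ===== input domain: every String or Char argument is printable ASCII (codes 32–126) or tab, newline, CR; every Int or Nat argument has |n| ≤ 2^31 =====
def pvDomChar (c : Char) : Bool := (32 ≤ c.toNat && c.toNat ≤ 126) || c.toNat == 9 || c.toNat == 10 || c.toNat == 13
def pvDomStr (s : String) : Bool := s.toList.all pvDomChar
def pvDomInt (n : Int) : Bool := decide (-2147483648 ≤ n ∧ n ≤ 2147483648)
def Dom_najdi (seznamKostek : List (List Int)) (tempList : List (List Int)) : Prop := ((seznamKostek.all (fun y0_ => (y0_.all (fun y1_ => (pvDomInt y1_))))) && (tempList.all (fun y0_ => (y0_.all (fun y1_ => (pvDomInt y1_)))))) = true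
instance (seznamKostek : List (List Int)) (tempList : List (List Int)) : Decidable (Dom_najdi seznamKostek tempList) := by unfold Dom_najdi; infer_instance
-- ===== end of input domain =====

-- B replaces A's factorial recursion over list slices by a memoized bitmask DP on
-- (unused-domino set, chain head value, chain tail value); return values agree on Pre_najdi.

-- ===== PORT A =====
-- Loop of A: `for pozice, domino in enumerate(seznamKostek)` walked as done/rest with
-- done = seznamKostek[:pozice] (so zbyvajici = seznamKostek[:pozice] + seznamKostek[pozice+1:]
-- is done ++ rtl) and rest = seznamKostek[pozice:]; `maximum` is the accumulator.
-- xs[i] is ported as (PySem.List.pyGet? xs i).getD _ : in range under Pre_najdi (Python raises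
-- exactly where pyGet? is none, and those inputs are excluded by Pre_najdi);
-- domino[::-1] is List.reverse (PySem.List.slice?_none_none_neg_one).
def najdiAux : (t done rest : List (List Int)) → Int → Int
  | _, _, [], m => m
  | t, done, domino :: rtl, m =>
    if m = ((done.length + (domino :: rtl).length : Nat) : Int) + ((t.length : Nat) : Int) then
      m  -- `break`: mame nejdelsi
    else
      let zbyv := done ++ rtl  -- seznamKostek[:pozice] + seznamKostek[pozice+1:]
      match t with
      | [] =>
        -- maximum = max(najdi(zbyvajici, [domino]), maximum)
        let m' := max (najdiAux [domino] [] zbyv ((([domino] : List (List Int)).length : Nat) : Int)) m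
        najdiAux [] (done ++ [domino]) rtl m'
      | h :: ts =>
        let obr := domino.reverse
        let head := (PySem.List.pyGet? (h :: ts) 0).getD []
        let tail := (PySem.List.pyGet? (h :: ts) (-1)).getD []
        let m' :=
          if (PySem.List.pyGet? domino 1).getD 0 = (PySem.List.pyGet? head 0).getD 0 then
            max (najdiAux (domino :: h :: ts) [] zbyv (((domino :: h :: ts).length : Nat) : Int)) m
          else if (PySem.List.pyGet? obr 1).getD 0 = (PySem.List.pyGet? head 0).getD 0 then
            max (najdiAux (obr :: h :: ts) [] zbyv (((obr :: h :: ts).length : Nat) : Int)) m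
          else if (PySem.List.pyGet? domino 0).getD 0 = (PySem.List.pyGet? tail 1).getD 0 then
            max (najdiAux ((h :: ts) ++ [domino]) [] zbyv ((((h :: ts) ++ [domino]).length : Nat) : Int)) m
          else if (PySem.List.pyGet? obr 0).getD 0 = (PySem.List.pyGet? tail 1).getD 0 then
            max (najdiAux ((h :: ts) ++ [obr]) [] zbyv ((((h :: ts) ++ [obr]).length : Nat) : Int)) m
          else m
        najdiAux (h :: ts) (done ++ [domino]) rtl m'
  termination_by _ done rest _ => (done.length + rest.length, rest.length)
  decreasing_by all_goals (simp; omega)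

def najdi (seznamKostek : List (List Int)) (tempList : List (List Int)) : Int :=
  najdiAux tempList [] seznamKostek ((tempList.length : Nat) : Int)

-- ===== PORT B =====
-- `avail ^ (1 << i)` clears a set bit, so it strictly decreases `avail`: termination lemma.
theorem pvXorPowLt (a : Nat) (i : Nat) (h : (a >>> i) &&& 1 = 1) : a ^^^ (1 <<< i) < a := by
  have hbit : a.testBit i = true := by
    simp only [Nat.and_one_is_mod] at h
    simp [Nat.testBit, h]
  refine Nat.lt_of_testBit i ?_ hbit ?_
  · simp [Nat.testBit_xor, hbit, Nat.shiftLeft_eq, Nat.testBit_two_pow_self]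
  · intro j hj
    simp [Nat.testBit_xor, Nat.shiftLeft_eq, Nat.testBit_two_pow_of_ne (Nat.ne_of_lt hj)]

mutual
-- def f(avail, head0, tail1, tlen, nav) of Source B, returning (value, memo) with the memo threaded
-- explicitly; the dict is PySem.Dict keyed by (avail, head0, tail1).
def faux (quads : List (Int × Int × Int × Int)) (avail : Nat) (head0 tail1 tlen nav : Int)
    (memo : PySem.Dict (Nat × Int × Int) Int) : Int × PySem.Dict (Nat × Int × Int) Int :=
  match PySem.Dict.get? memo (avail, head0, tail1) with
  | some v => (v, memo)
  | none =>
    let r := floop quads (PySem.List.enumerate quads 0) avail head0 tail1 tlen nav tlen memo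
    (r.1, PySem.Dict.insert r.2 (avail, head0, tail1) r.1)
  termination_by (avail, quads.length + 1)

-- `for i, (a, b, y, x) in enumerate(quads): …` inside f, with `best` the accumulator;
-- `if best == bound: break` is the early return, `(avail >> i) & 1` the availability test.
def floop (quads : List (Int × Int × Int × Int)) (items : List (Int × (Int × Int × Int × Int)))
    (avail : Nat) (head0 tail1 tlen nav best : Int)
    (memo : PySem.Dict (Nat × Int × Int) Int) : Int × PySem.Dict (Nat × Int × Int) Int :=
  match items with
  | [] => (best, memo)
  | (i, (a, b, y, x)) :: rest =>
    if best = tlen + nav then (best, memo)  -- break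
    else if hb : (avail >>> i.toNat) &&& 1 = 1 then
      let nxt := avail ^^^ (1 <<< i.toNat)
      if b = head0 then
        let r := faux quads nxt a tail1 (tlen + 1) (nav - 1) memo
        floop quads rest avail head0 tail1 tlen nav (max r.1 best) r.2
      else if x = head0 then
        let r := faux quads nxt y tail1 (tlen + 1) (nav - 1) memo
        floop quads rest avail head0 tail1 tlen nav (max r.1 best) r.2
      else if a = tail1 then
        let r := faux quads nxt head0 b (tlen + 1) (nav - 1) memo
        floop quads rest avail head0 tail1 tlen nav (max r.1 best) r.2
      else if y = tail1 then
        let r := faux quads nxt head0 x (tlen + 1) (nav - 1) memo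
        floop quads rest avail head0 tail1 tlen nav (max r.1 best) r.2
      else floop quads rest avail head0 tail1 tlen nav best memo
    else floop quads rest avail head0 tail1 tlen nav best memo  -- continue
  termination_by (avail, items.length)
  decreasing_by
    all_goals first
      | exact Prod.Lex.left _ _ (pvXorPowLt _ _ hb)
      | (apply Prod.Lex.right; simp)
end

-- top-level `for i, (a, b, y, x) in enumerate(quads)` of Source B when tempList is empty
def tloop (quads : List (Int × Int × Int × Int)) (items : List (Int × (Int × Int × Int × Int)))
    (n : Nat) (best : Int) (memo : PySem.Dict (Nat × Int × Int) Int) :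
    Int × PySem.Dict (Nat × Int × Int) Int :=
  match items with
  | [] => (best, memo)
  | (i, (a, b, _, _)) :: rest =>
    if best = (n : Int) then (best, memo)  -- break
    else
      let r := faux quads (((1 <<< n) - 1) ^^^ (1 <<< i.toNat)) a b 1 ((n : Int) - 1) memo
      tloop quads rest n (max best r.1) r.2

def najdi_alt (seznamKostek : List (List Int)) (tempList : List (List Int)) : Int :=
  match seznamKostek with
  | [] => ((tempList.length : Nat) : Int)
  | _ :: _ =>
    -- quads = [(d[0], d[1], d[-1], d[-2]) for d in seznamKostek]; indices in range under Pre_najdi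
    let quads := seznamKostek.map (fun d =>
      ((PySem.List.pyGet? d 0).getD 0, (PySem.List.pyGet? d 1).getD 0,
       (PySem.List.pyGet? d (-1)).getD 0, (PySem.List.pyGet? d (-2)).getD 0))
    let n := seznamKostek.length
    match tempList with
    | h :: ts =>
      (faux quads ((1 <<< n) - 1) ((PySem.List.pyGet? h 0).getD 0)
        ((PySem.List.pyGet? ((PySem.List.pyGet? (h :: ts) (-1)).getD []) 1).getD 0)
        (((h :: ts).length : Nat) : Int) ((n : Nat) : Int) PySem.Dict.empty).1
    | [] => (tloop quads (PySem.List.enumerate quads 0) n 0 PySem.Dict.empty).1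

-- ===== PRECONDITION & SPEC =====
-- Pre_najdi excludes exactly the inputs on which Python A raises IndexError (a domino or the
-- first/last chain piece too short to be indexed), except that with a NONEMPTY seznamKostek it
-- also asks every domino to have length ≥ 2 even in the few degenerate cases (e.g. a single
-- short domino with an empty tempList) where A happens to return before indexing it and B's
-- quad precomputation raises; see claim.json "cites".
def Pre_najdi (seznamKostek : List (List Int)) (tempList : List (List Int)) : Prop :=
  seznamKostek = [] ∨
    ((∀ d ∈ seznamKostek, 2 ≤ d.length) ∧
      (tempList = [] ∨
        (1 ≤ (tempList.head?.getD []).length ∧ 2 ≤ (tempList.getLast?.getD []).length)))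
instance (seznamKostek : List (List Int)) (tempList : List (List Int)) : Decidable (Pre_najdi seznamKostek tempList) := by unfold Pre_najdi; infer_instance
def pvWitness_najdi : List (List Int) × List (List Int) := ([[1, 2], [2, 3]], [[3, 4]])
def Spec_najdi (seznamKostek : List (List Int)) (tempList : List (List Int)) (out : Int) : Prop := out = najdi_alt seznamKostek tempList
instance (seznamKostek : List (List Int)) (tempList : List (List Int)) (out : Int) : Decidable (Spec_najdi seznamKostek tempList out) := by unfold Spec_najdi; infer_instance

-- ===== CLAIM (what is proved, stated in full; the proofs are below) =====
def Claim_equal_najdi : Prop := ∀ (seznamKostek : List (List Int)) (tempList : List (List Int)), Dom_najdi seznamKostek tempList → Pre_najdi seznamKostek tempList → Spec_najdi seznamKostek tempList (najdi seznamKostek tempList)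

-- ===== LEMMAS AND PROOFS =====

-- ---------- proof-side helpers ----------

-- the four values the search ever reads from a domino: d[0], d[1], d[-1], d[-2]
def quadOf (d : List Int) : Int × Int × Int × Int :=
  ((PySem.List.pyGet? d 0).getD 0, (PySem.List.pyGet? d 1).getD 0,
   (PySem.List.pyGet? d (-1)).getD 0, (PySem.List.pyGet? d (-2)).getD 0)

-- head value tempList[0][0] and tail value tempList[-1][1], exactly as A computes them
def chH (t : List (List Int)) : Int :=
  (PySem.List.pyGet? ((PySem.List.pyGet? t 0).getD []) 0).getD 0
def chT (t : List (List Int)) : Int :=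
  (PySem.List.pyGet? ((PySem.List.pyGet? t (-1)).getD []) 1).getD 0

-- popcount (via the prelude's bit primitive)
def pc (a : Nat) : Nat := PySem.Int.bitCount (a : Int)

-- the sublist of l selected by the bits of avail (element j ↔ bit k + j)
def selFrom (l : List (List Int)) (k : Nat) (avail : Nat) : List (List Int) :=
  match l with
  | [] => []
  | d :: ds => (if avail.testBit k then [d] else []) ++ selFrom ds (k + 1) avail

-- pure (memo-free, break-free) value of the bitmask search: the common specification
mutual
def gF (quads : List (Int × Int × Int × Int)) (avail : Nat) (head0 tail1 tlen : Int) : Int :=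
  gLoop quads (PySem.List.enumerate quads 0) avail head0 tail1 tlen tlen
  termination_by (avail, quads.length + 1)

def gLoop (quads : List (Int × Int × Int × Int)) (items : List (Int × (Int × Int × Int × Int)))
    (avail : Nat) (head0 tail1 tlen best : Int) : Int :=
  match items with
  | [] => best
  | (i, (a, b, y, x)) :: rest =>
    if hb : (avail >>> i.toNat) &&& 1 = 1 then
      gLoop quads rest avail head0 tail1 tlen
        (if b = head0 then max (gF quads (avail ^^^ (1 <<< i.toNat)) a tail1 (tlen + 1)) best
         else if x = head0 then max (gF quads (avail ^^^ (1 <<< i.toNat)) y tail1 (tlen + 1)) best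
         else if a = tail1 then max (gF quads (avail ^^^ (1 <<< i.toNat)) head0 b (tlen + 1)) best
         else if y = tail1 then max (gF quads (avail ^^^ (1 <<< i.toNat)) head0 x (tlen + 1)) best
         else best)
    else gLoop quads rest avail head0 tail1 tlen best
  termination_by (avail, items.length)
  decreasing_by
    all_goals first
      | exact Prod.Lex.left _ _ (pvXorPowLt _ _ hb)
      | (apply Prod.Lex.right; simp)
end

-- ---------- bit lemmas ----------

theorem pvTestBitIff (a k : Nat) : ((a >>> k) &&& 1 = 1) ↔ a.testBit k = true := by
  rw [Nat.and_one_is_mod]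
  simp [Nat.testBit]

theorem pvTbXorNe (a i j : Nat) (h : j ≠ i) : (a ^^^ (1 <<< i)).testBit j = a.testBit j := by
  simp [Nat.testBit_xor, Nat.shiftLeft_eq, Nat.testBit_two_pow_of_ne (Ne.symm h)]

theorem pvTbXorSelf (a i : Nat) : (a ^^^ (1 <<< i)).testBit i = !(a.testBit i) := by
  simp [Nat.testBit_xor, Nat.shiftLeft_eq, Nat.testBit_two_pow_self, Bool.xor_comm]

theorem pvTbFull (n j : Nat) : ((1 <<< n) - 1).testBit j = decide (j < n) := by
  simp [Nat.shiftLeft_eq, Nat.testBit_two_pow_sub_one]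

theorem pvXorDivTwo (a b : Nat) : (a ^^^ b) / 2 = a / 2 ^^^ b / 2 := by
  apply Nat.eq_of_testBit_eq; intro j
  simp [← Nat.testBit_add_one, Nat.testBit_xor]

theorem pcZero : pc 0 = 0 := by decide

theorem pcHalf (a : Nat) (h : 0 < a) : pc a = a % 2 + pc (a / 2) := by
  have := PySem.Int.bitCount_natCast (m := a) h
  simpa [pc] using this

theorem pvTestBitMod (a k : Nat) : a.testBit k = ((a >>> k) % 2 != 0) := by
  simp [Nat.testBit, Nat.one_and_eq_mod_two]

theorem pcShift (a k : Nat) : pc (a >>> k) = (if a.testBit k then 1 else 0) + pc (a >>> (k + 1)) := by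
  rcases Nat.eq_zero_or_pos (a >>> k) with h0 | hpos
  · have h1 : a >>> (k+1) = 0 := by rw [Nat.shiftRight_succ, h0]
    have hb : a.testBit k = false := by rw [pvTestBitMod, h0]; simp
    simp [h0, h1, hb, pcZero]
  · rw [pcHalf _ hpos, Nat.shiftRight_succ]
    rw [pvTestBitMod]
    have := Nat.mod_two_eq_zero_or_one (a >>> k)
    rcases this with h | h <;> simp [h]

theorem pcPow (i : Nat) : pc (1 <<< i) = 1 := by
  induction i with
  | zero => decide
  | succ i ih =>
    have h2 : (1:Nat) <<< (i+1) = 2 * (1 <<< i) := by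
      simp [Nat.shiftLeft_eq, Nat.pow_succ]; ring
    have hp : 0 < (1:Nat) <<< (i+1) := by simp [Nat.shiftLeft_eq]
    rw [pcHalf _ hp, h2]
    simp [ih]

theorem pcXor (a i : Nat) (h : a.testBit i = true) : pc (a ^^^ (1 <<< i)) + 1 = pc a := by
  induction i generalizing a with
  | zero =>
    have hodd : a % 2 = 1 := by
      rw [pvTestBitMod] at h; simp at h; omega
    have ha : 0 < a := by omega
    rcases Nat.eq_zero_or_pos (a ^^^ (1 <<< 0)) with h0 | hp
    · have ha1 : a = 1 <<< 0 := by
        have := Nat.xor_eq_zero_iff.mp h0; omega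
      rw [h0, ha1]; decide
    · rw [pcHalf _ hp, pcHalf _ ha]
      have hd : (a ^^^ (1 <<< 0)) / 2 = a / 2 := by
        rw [pvXorDivTwo]
        norm_num
      have hm : (a ^^^ (1 <<< 0)) % 2 = 0 := by
        rw [Nat.xor_mod_two_eq]; omega
      rw [hd, hm, hodd]; omega
  | succ i ih =>
    have hpos : 0 < a := by
      rcases Nat.eq_zero_or_pos a with h0 | hp
      · rw [h0] at h; simp [pvTestBitMod] at h
      · exact hp
    have hhalf : (a / 2).testBit i = true := by rwa [← Nat.testBit_add_one]
    have hd : (a ^^^ (1 <<< (i+1))) / 2 = a / 2 ^^^ (1 <<< i) := by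
      rw [pvXorDivTwo]
      congr 1
      simp [Nat.shiftLeft_eq, Nat.pow_succ]
    have hm : (a ^^^ (1 <<< (i+1))) % 2 = a % 2 := by
      rw [Nat.xor_mod_two_eq]
      have : (1:Nat) <<< (i+1) = 2 * (1 <<< i) := by
        simp [Nat.shiftLeft_eq, Nat.pow_succ]; ring
      omega
    rcases Nat.eq_zero_or_pos (a ^^^ (1 <<< (i+1))) with h0 | hp
    · -- a = 2^(i+1)
      have ha1 : a = 1 <<< (i+1) := by
        have := Nat.xor_eq_zero_iff.mp h0; omega
      rw [h0, ha1, pcPow, pcZero]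
    · rw [pcHalf _ hp, pcHalf _ hpos, hd, hm]
      have := ih (a / 2) hhalf
      omega

theorem pcFull (n : Nat) : pc ((1 <<< n) - 1) = n := by
  induction n with
  | zero => decide
  | succ n ih =>
    have h2 : (1:Nat) <<< (n+1) = 2 * (1 <<< n) := by
      simp [Nat.shiftLeft_eq, Nat.pow_succ]; ring
    have hp1 : 0 < (1:Nat) <<< n := by simp [Nat.shiftLeft_eq]
    have hp : 0 < (1:Nat) <<< (n+1) - 1 := by omega
    rw [pcHalf _ hp]
    have hdiv : ((1:Nat) <<< (n+1) - 1) / 2 = 1 <<< n - 1 := by omega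
    have hmod : ((1:Nat) <<< (n+1) - 1) % 2 = 1 := by omega
    rw [hdiv, hmod, ih]; omega

-- ---------- selFrom lemmas ----------

theorem selFrom_append (l1 l2 : List (List Int)) (k avail : Nat) :
    selFrom (l1 ++ l2) k avail = selFrom l1 k avail ++ selFrom l2 (k + l1.length) avail := by
  induction l1 generalizing k with
  | nil => simp [selFrom]
  | cons d ds ih =>
    simp only [List.cons_append, selFrom, ih, List.length_cons]
    rw [List.append_assoc]
    ring_nf

theorem selFrom_congr (l : List (List Int)) (k : Nat) (a b : Nat)
    (h : ∀ j, k ≤ j → j < k + l.length → a.testBit j = b.testBit j) :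
    selFrom l k a = selFrom l k b := by
  induction l generalizing k with
  | nil => rfl
  | cons d ds ih =>
    simp only [selFrom]
    rw [h k (le_refl _) (by simp), ih (k+1) (fun j hj1 hj2 => h j (by omega) (by simp at hj2 ⊢; omega))]

theorem selFrom_full (l : List (List Int)) (k a : Nat)
    (h : ∀ j, k ≤ j → j < k + l.length → a.testBit j = true) :
    selFrom l k a = l := by
  induction l generalizing k with
  | nil => rfl
  | cons d ds ih =>
    simp only [selFrom]
    rw [h k (le_refl _) (by simp)]
    simp [ih (k+1) (fun j hj1 hj2 => h j (by omega) (by simp at hj2 ⊢; omega))]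

theorem length_selFrom (l : List (List Int)) (k a : Nat) (h : a < 2 ^ (k + l.length)) :
    (selFrom l k a).length = pc (a >>> k) := by
  induction l generalizing k with
  | nil =>
    have : a >>> k = 0 := by
      rw [Nat.shiftRight_eq_div_pow]
      apply Nat.div_eq_of_lt
      simpa using h
    simp [selFrom, this, pcZero]
  | cons d ds ih =>
    rw [pcShift]
    simp only [selFrom, List.length_append]
    have hexp : k + 1 + ds.length = k + (d :: ds).length := by simp; omega
    rw [ih (k+1) (by rw [hexp]; exact h)]
    split <;> simp

-- ---------- chH / chT computation lemmas ----------

theorem chH_cons (d : List Int) (t : List (List Int)) :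
    chH (d :: t) = (PySem.List.pyGet? d 0).getD 0 := by
  simp [chH]

theorem chT_cons (d : List Int) (t : List (List Int)) (ht : t ≠ []) : chT (d :: t) = chT t := by
  rcases t with _ | ⟨h2, ts⟩
  · exact absurd rfl ht
  · simp [chT, PySem.List.pyGet?_neg_one]

theorem chT_append (t : List (List Int)) (d : List Int) :
    chT (t ++ [d]) = (PySem.List.pyGet? d 1).getD 0 := by
  simp [chT, PySem.List.pyGet?_neg_one_append_singleton]

theorem chH_append (t : List (List Int)) (d : List Int) (ht : t ≠ []) : chH (t ++ [d]) = chH t := by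
  rcases t with _ | ⟨h2, ts⟩
  · exact absurd rfl ht
  · simp [chH, PySem.List.pyGet?_zero_cons]

theorem chT_singleton (d : List Int) : chT [d] = (PySem.List.pyGet? d 1).getD 0 := by
  simp [chT, PySem.List.pyGet?_neg_one]

theorem pvRev0 (d : List Int) :
    (PySem.List.pyGet? d.reverse 0).getD 0 = (PySem.List.pyGet? d (-1)).getD 0 := by
  rw [PySem.List.pyGet?_zero, PySem.List.pyGet?_neg_one]
  rw [← List.head?_eq_getElem?, List.head?_reverse]

theorem pvRev1 (d : List Int) (hd : 2 ≤ d.length) :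
    (PySem.List.pyGet? d.reverse 1).getD 0 = (PySem.List.pyGet? d (-2)).getD 0 := by
  have h1 : (1 : Int) = ((1 : Nat) : Int) := by norm_num
  rw [h1, PySem.List.pyGet?_natCast]
  rw [PySem.List.pyGet?_neg_ofNat d 2 (by omega) (by omega)]
  rw [List.getElem?_eq_getElem (by rw [List.length_reverse]; omega), List.getElem?_eq_getElem (by omega)]
  simp only [Option.getD_some, List.getElem_reverse]
  congr 1

-- ---------- bounds on the pure search ----------

theorem le_gLoop (quads : List (Int × Int × Int × Int)) (items : List (Int × (Int × Int × Int × Int)))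
    (avail : Nat) (head0 tail1 tlen : Int) :
    ∀ best, best ≤ gLoop quads items avail head0 tail1 tlen best := by
  induction items with
  | nil => intro best; rw [gLoop]
  | cons it rest ihr =>
    intro best
    obtain ⟨i, a, b, y, x⟩ := it
    rw [gLoop]
    by_cases hb : (avail >>> i.toNat) &&& 1 = 1
    · rw [dif_pos hb]
      refine le_trans ?_ (ihr _)
      split_ifs <;> simp
    · rw [dif_neg hb]
      exact ihr best

theorem pvBound (avail : Nat) : ∀ (quads : List (Int × Int × Int × Int)) (head0 tail1 tlen : Int),
    (∀ items best, gLoop quads items avail head0 tail1 tlen best ≤ max best (tlen + (pc avail : Int)))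
    ∧ gF quads avail head0 tail1 tlen ≤ tlen + (pc avail : Int) := by
  induction avail using Nat.strong_induction_on with
  | _ avail IH =>
    intro quads head0 tail1 tlen
    have hloop : ∀ items best, gLoop quads items avail head0 tail1 tlen best ≤ max best (tlen + (pc avail : Int)) := by
      intro items
      induction items with
      | nil => intro best; rw [gLoop]; exact le_max_left _ _
      | cons it rest ihr =>
        intro best
        obtain ⟨i, a, b, y, x⟩ := it
        rw [gLoop]
        by_cases hb : (avail >>> i.toNat) &&& 1 = 1
        · rw [dif_pos hb]
          have hlt : avail ^^^ (1 <<< i.toNat) < avail := pvXorPowLt _ _ hb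
          have hpc : pc (avail ^^^ (1 <<< i.toNat)) + 1 = pc avail :=
            pcXor _ _ ((pvTestBitIff _ _).mp hb)
          have hgf : ∀ h0' t1', gF quads (avail ^^^ (1 <<< i.toNat)) h0' t1' (tlen + 1)
              ≤ tlen + (pc avail : Int) := by
            intro h0' t1'
            have h2 := (IH _ hlt quads h0' t1' (tlen + 1)).2
            have h3 : ((pc (avail ^^^ (1 <<< i.toNat)) : Int)) + 1 = (pc avail : Int) := by
              exact_mod_cast hpc
            omega
          refine le_trans (ihr _) ?_
          have hb' : (if b = head0 then max (gF quads (avail ^^^ (1 <<< i.toNat)) a tail1 (tlen + 1)) best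
              else if x = head0 then max (gF quads (avail ^^^ (1 <<< i.toNat)) y tail1 (tlen + 1)) best
              else if a = tail1 then max (gF quads (avail ^^^ (1 <<< i.toNat)) head0 b (tlen + 1)) best
              else if y = tail1 then max (gF quads (avail ^^^ (1 <<< i.toNat)) head0 x (tlen + 1)) best
              else best) ≤ max best (tlen + (pc avail : Int)) := by
            split_ifs <;> first
              | exact le_max_left _ _
              | (rename_i h; exact max_le (le_trans (hgf _ _) (le_max_right _ _)) (le_max_left _ _))
          exact le_trans (max_le_max_right _ hb') (by simp)
        · rw [dif_neg hb]
          exact le_trans (ihr best) (le_refl _)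
    refine ⟨hloop, ?_⟩
    rw [gF]
    refine le_trans (hloop _ _) ?_
    have : (0 : Int) ≤ (pc avail : Int) := by positivity
    omega

theorem gF_le (avail : Nat) (quads : List (Int × Int × Int × Int)) (head0 tail1 tlen : Int) :
    gF quads avail head0 tail1 tlen ≤ tlen + (pc avail : Int) :=
  (pvBound avail quads head0 tail1 tlen).2

theorem gLoop_le (quads : List (Int × Int × Int × Int)) (avail : Nat)
    (items : List (Int × (Int × Int × Int × Int))) (head0 tail1 tlen best : Int) :
    gLoop quads items avail head0 tail1 tlen best ≤ max best (tlen + (pc avail : Int)) :=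
  (pvBound avail quads head0 tail1 tlen).1 items best

-- ---------- A = pure search ----------

theorem pvMain (s0 : List (List Int)) (hS : ∀ d ∈ s0, 2 ≤ d.length) :
    ∀ (avail : Nat), avail < 1 <<< s0.length → ∀ (t : List (List Int)), t ≠ [] →
      najdi (selFrom s0 0 avail) t
        = gF (s0.map quadOf) avail (chH t) (chT t) ((t.length : Nat) : Int) := by
  intro avail
  induction avail using Nat.strong_induction_on with
  | _ avail IH =>
    intro hA t ht
    obtain ⟨th, tts, rfl⟩ : ∃ th tts, t = th :: tts := by
      cases t with
      | nil => exact absurd rfl ht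
      | cons th tts => exact ⟨th, tts, rfl⟩
    have hA2 : avail < 2 ^ (0 + s0.length) := by
      simpa [Nat.shiftLeft_eq] using hA
    have hpcs : (selFrom s0 0 avail).length = pc avail := by
      have := length_selFrom s0 0 avail hA2
      simpa [Nat.shiftRight_zero] using this
    have hInner : ∀ (suf pre : List (List Int)), s0 = pre ++ suf →
        ∀ m : Int, m ≤ (((th :: tts).length : Nat) : Int) + (pc avail : Int) →
        najdiAux (th :: tts) (selFrom pre 0 avail) (selFrom suf pre.length avail) m
          = gLoop (s0.map quadOf) (PySem.List.enumerate (suf.map quadOf) ((pre.length : Nat) : Int))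
              avail (chH (th :: tts)) (chT (th :: tts)) (((th :: tts).length : Nat) : Int) m := by
      intro suf
      induction suf with
      | nil =>
        intro pre hsplit m hm
        rw [show selFrom [] pre.length avail = [] from rfl, najdiAux]
        simp [PySem.List.enumerate_nil, gLoop]
      | cons d suf' ihs =>
        intro pre hsplit m hm
        have hd2 : 2 ≤ d.length := hS d (by rw [hsplit]; simp)
        have hsplitlen : (selFrom pre 0 avail).length + (selFrom (d :: suf') pre.length avail).length = pc avail := by
          have h1 : selFrom s0 0 avail = selFrom pre 0 avail ++ selFrom (d :: suf') pre.length avail := by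
            rw [hsplit, selFrom_append]
            simp
          rw [← hpcs, h1, List.length_append]
        rw [List.map_cons, PySem.List.enumerate_cons]
        have hq : quadOf d = ((PySem.List.pyGet? d 0).getD 0, (PySem.List.pyGet? d 1).getD 0,
            (PySem.List.pyGet? d (-1)).getD 0, (PySem.List.pyGet? d (-2)).getD 0) := rfl
        rw [hq]
        have hidx : ((pre.length : Nat) : Int).toNat = pre.length := by simp
        have hstart : ((pre.length : Nat) : Int) + 1 = (((pre.length + 1 : Nat)) : Int) := by push_cast; ring
        by_cases hbit : avail.testBit pre.length
        · -- element pre.length is selected: A's loop visits d here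
          rw [show selFrom (d :: suf') pre.length avail = d :: selFrom suf' (pre.length + 1) avail by
            simp [selFrom, hbit]]
          have hbit1 : (avail >>> ((pre.length : Nat) : Int).toNat) &&& 1 = 1 := by
            rw [hidx]; exact (pvTestBitIff _ _).mpr hbit
          by_cases hbrk : m = (((selFrom pre 0 avail).length + (d :: selFrom suf' (pre.length + 1) avail).length : Nat) : Int) + (((th :: tts).length : Nat) : Int)
          · -- A breaks: m is already the total bound, and the pure loop cannot exceed it
            rw [najdiAux, if_pos hbrk]
            have hmb : m = (((th :: tts).length : Nat) : Int) + (pc avail : Int) := by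
              rw [hbrk]
              have : (selFrom pre 0 avail).length + (d :: selFrom suf' (pre.length + 1) avail).length = pc avail := by
                rw [← hsplitlen]
                simp [selFrom, hbit]
              rw [this]
              ring
            have h1 := gLoop_le (s0.map quadOf) avail
              ((((pre.length : Nat) : Int), ((PySem.List.pyGet? d 0).getD 0, (PySem.List.pyGet? d 1).getD 0,
                (PySem.List.pyGet? d (-1)).getD 0, (PySem.List.pyGet? d (-2)).getD 0))
                :: PySem.List.enumerate (suf'.map quadOf) (((pre.length : Nat) : Int) + 1))
              (chH (th :: tts)) (chT (th :: tts)) (((th :: tts).length : Nat) : Int) m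
            have h2 := le_gLoop (s0.map quadOf)
              ((((pre.length : Nat) : Int), ((PySem.List.pyGet? d 0).getD 0, (PySem.List.pyGet? d 1).getD 0,
                (PySem.List.pyGet? d (-1)).getD 0, (PySem.List.pyGet? d (-2)).getD 0))
                :: PySem.List.enumerate (suf'.map quadOf) (((pre.length : Nat) : Int) + 1))
              avail (chH (th :: tts)) (chT (th :: tts)) (((th :: tts).length : Nat) : Int) m
            have h3 : max m ((((th :: tts).length : Nat) : Int) + (pc avail : Int)) = m := by omega
            rw [h3] at h1
            exact le_antisymm h2 h1
          · -- A processes d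
            rw [najdiAux, if_neg hbrk]
            dsimp only
            rw [gLoop, dif_pos hbit1]
            -- the removed-piece list is the selection at the cleared bit
            have hzbyv : selFrom pre 0 avail ++ selFrom suf' (pre.length + 1) avail
                = selFrom s0 0 (avail ^^^ (1 <<< pre.length)) := by
              rw [hsplit, selFrom_append]
              have hpre : selFrom pre 0 (avail ^^^ (1 <<< pre.length)) = selFrom pre 0 avail := by
                apply selFrom_congr
                intro j hj1 hj2
                exact pvTbXorNe _ _ _ (by simp at hj2; omega)
              have hcons : selFrom (d :: suf') (0 + pre.length) (avail ^^^ (1 <<< pre.length))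
                  = selFrom suf' (pre.length + 1) avail := by
                rw [Nat.zero_add]
                have hb0 : (avail ^^^ (1 <<< pre.length)).testBit pre.length = false := by
                  rw [pvTbXorSelf, hbit]; rfl
                have : selFrom suf' (pre.length + 1) (avail ^^^ (1 <<< pre.length))
                    = selFrom suf' (pre.length + 1) avail := by
                  apply selFrom_congr
                  intro j hj1 hj2
                  exact pvTbXorNe _ _ _ (by omega)
                simp [selFrom, hb0, this]
              rw [hpre, hcons]
            have hlt : avail ^^^ (1 <<< pre.length) < avail :=
              pvXorPowLt _ _ ((pvTestBitIff _ _).mpr hbit)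
            have hpcI : ((pc (avail ^^^ (1 <<< pre.length)) : Int)) + 1 = (pc avail : Int) := by
              exact_mod_cast pcXor _ _ hbit
            have hrec : ∀ t' : List (List Int), t' ≠ [] →
                najdiAux t' [] (selFrom pre 0 avail ++ selFrom suf' (pre.length + 1) avail) ((t'.length : Nat) : Int)
                  = gF (s0.map quadOf) (avail ^^^ (1 <<< pre.length)) (chH t') (chT t') ((t'.length : Nat) : Int) := by
              intro t' ht'
              have := IH _ hlt (lt_trans hlt hA) t' ht'
              rw [najdi] at this
              rw [hzbyv]
              exact this
            -- the four attach values
            have hlen1 : (((d :: th :: tts).length : Nat) : Int) = (((th :: tts).length : Nat) : Int) + 1 := by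
              push_cast [List.length_cons]; ring
            have hlen2 : ((((th :: tts) ++ [d]).length : Nat) : Int) = (((th :: tts).length : Nat) : Int) + 1 := by
              push_cast [List.length_append, List.length_cons, List.length_nil]; ring
            have hlen3 : (((d.reverse :: th :: tts).length : Nat) : Int) = (((th :: tts).length : Nat) : Int) + 1 := by
              push_cast [List.length_cons]; ring
            have hlen4 : ((((th :: tts) ++ [d.reverse]).length : Nat) : Int) = (((th :: tts).length : Nat) : Int) + 1 := by
              push_cast [List.length_append, List.length_cons, List.length_nil]; ring
            have hv1 : najdiAux (d :: th :: tts) [] (selFrom pre 0 avail ++ selFrom suf' (pre.length + 1) avail) (((d :: th :: tts).length : Nat) : Int)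
                = gF (s0.map quadOf) (avail ^^^ (1 <<< pre.length)) ((PySem.List.pyGet? d 0).getD 0) (chT (th :: tts)) ((((th :: tts).length : Nat) : Int) + 1) := by
              rw [hrec _ (by simp), chH_cons, chT_cons _ _ (by simp), hlen1]
            have hv2 : najdiAux (d.reverse :: th :: tts) [] (selFrom pre 0 avail ++ selFrom suf' (pre.length + 1) avail) (((d.reverse :: th :: tts).length : Nat) : Int)
                = gF (s0.map quadOf) (avail ^^^ (1 <<< pre.length)) ((PySem.List.pyGet? d (-1)).getD 0) (chT (th :: tts)) ((((th :: tts).length : Nat) : Int) + 1) := by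
              rw [hrec _ (by simp), chH_cons, chT_cons _ _ (by simp), hlen3, pvRev0]
            have hv3 : najdiAux ((th :: tts) ++ [d]) [] (selFrom pre 0 avail ++ selFrom suf' (pre.length + 1) avail) ((((th :: tts) ++ [d]).length : Nat) : Int)
                = gF (s0.map quadOf) (avail ^^^ (1 <<< pre.length)) (chH (th :: tts)) ((PySem.List.pyGet? d 1).getD 0) ((((th :: tts).length : Nat) : Int) + 1) := by
              rw [hrec _ (by simp), chH_append _ _ (by simp), chT_append, hlen2]
            have hv4 : najdiAux ((th :: tts) ++ [d.reverse]) [] (selFrom pre 0 avail ++ selFrom suf' (pre.length + 1) avail) ((((th :: tts) ++ [d.reverse]).length : Nat) : Int)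
                = gF (s0.map quadOf) (avail ^^^ (1 <<< pre.length)) (chH (th :: tts)) ((PySem.List.pyGet? d (-2)).getD 0) ((((th :: tts).length : Nat) : Int) + 1) := by
              rw [hrec _ (by simp), chH_append _ _ (by simp), chT_append, hlen4, pvRev1 _ hd2]
            have hgle : ∀ h0' t1', gF (s0.map quadOf) (avail ^^^ (1 <<< pre.length)) h0' t1' ((((th :: tts).length : Nat) : Int) + 1)
                ≤ (((th :: tts).length : Nat) : Int) + (pc avail : Int) := by
              intro h0' t1'
              have := gF_le (avail ^^^ (1 <<< pre.length)) (s0.map quadOf) h0' t1' ((((th :: tts).length : Nat) : Int) + 1)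
              omega
            -- fold A's head/tail reads into chH/chT
            have hchH : (PySem.List.pyGet? ((PySem.List.pyGet? (th :: tts) 0).getD []) 0).getD 0 = chH (th :: tts) := rfl
            have hchT : (PySem.List.pyGet? ((PySem.List.pyGet? (th :: tts) (-1)).getD []) 1).getD 0 = chT (th :: tts) := rfl
            rw [hchH, hchT, pvRev0, pvRev1 _ hd2]
            -- both sides now branch on the same four conditions
            have happly : ∀ m' : Int, m' ≤ (((th :: tts).length : Nat) : Int) + (pc avail : Int) →
                najdiAux (th :: tts) (selFrom pre 0 avail ++ [d]) (selFrom suf' (pre.length + 1) avail) m'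
                  = gLoop (s0.map quadOf) (PySem.List.enumerate (suf'.map quadOf) (((pre.length : Nat) : Int) + 1))
                      avail (chH (th :: tts)) (chT (th :: tts)) (((th :: tts).length : Nat) : Int) m' := by
              intro m' hm'
              have := ihs (pre ++ [d]) (by rw [hsplit]; simp) m' hm'
              rw [show selFrom (pre ++ [d]) 0 avail = selFrom pre 0 avail ++ [d] by
                    rw [selFrom_append]; simp [selFrom, hbit]] at this
              rw [show (pre ++ [d]).length = pre.length + 1 by simp] at this
              rw [hstart]
              exact this
            split_ifs with h1 h2 h3 h4
            · rw [hv1]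
              exact happly _ (by have := hgle ((PySem.List.pyGet? d 0).getD 0) (chT (th :: tts)); omega)
            · rw [hv2]
              exact happly _ (by have := hgle ((PySem.List.pyGet? d (-1)).getD 0) (chT (th :: tts)); omega)
            · rw [hv3]
              exact happly _ (by have := hgle (chH (th :: tts)) ((PySem.List.pyGet? d 1).getD 0); omega)
            · rw [hv4]
              exact happly _ (by have := hgle (chH (th :: tts)) ((PySem.List.pyGet? d (-2)).getD 0); omega)
            · exact happly _ hm
        · -- element pre.length is not selected: A's list simply does not contain it
          rw [show selFrom (d :: suf') pre.length avail = selFrom suf' (pre.length + 1) avail by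
            simp [selFrom, hbit]]
          have hbit0 : ¬ ((avail >>> ((pre.length : Nat) : Int).toNat) &&& 1 = 1) := by
            rw [hidx]
            intro hc
            exact absurd ((pvTestBitIff _ _).mp hc) hbit
          rw [gLoop, dif_neg hbit0]
          have := ihs (pre ++ [d]) (by rw [hsplit]; simp) m hm
          rw [show selFrom (pre ++ [d]) 0 avail = selFrom pre 0 avail by
                rw [selFrom_append]; simp [selFrom, hbit]] at this
          rw [show (pre ++ [d]).length = pre.length + 1 by simp] at this
          rw [hstart]
          exact this
    have hfin := hInner s0 [] (by simp) (((th :: tts).length : Nat) : Int) (by omega)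
    rw [najdi, gF]
    simpa [selFrom] using hfin

-- ---------- memoized search = pure search ----------

def pvInv (quads : List (Int × Int × Int × Int)) (base : Int)
    (memo : PySem.Dict (Nat × Int × Int) Int) : Prop :=
  ∀ a h t v, PySem.Dict.get? memo (a, h, t) = some v → v = gF quads a h t (base - (pc a : Int))

theorem pvMemo (quads : List (Int × Int × Int × Int)) (base : Int) :
    ∀ (avail : Nat) (head0 tail1 tlen nav : Int) (memo : PySem.Dict (Nat × Int × Int) Int),
      tlen = base - (pc avail : Int) → nav = ((pc avail : Nat) : Int) →
      pvInv quads base memo →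
      (faux quads avail head0 tail1 tlen nav memo).1 = gF quads avail head0 tail1 tlen
        ∧ pvInv quads base (faux quads avail head0 tail1 tlen nav memo).2 := by
  intro avail
  induction avail using Nat.strong_induction_on with
  | _ avail IH =>
    intro head0 tail1 tlen nav memo htlen hnav hInv
    have hpc0 : (0 : Int) ≤ (pc avail : Int) := by positivity
    have hloop : ∀ (items : List (Int × (Int × Int × Int × Int))) (best : Int)
        (memo' : PySem.Dict (Nat × Int × Int) Int), pvInv quads base memo' → best ≤ base →
        (floop quads items avail head0 tail1 tlen nav best memo').1
            = gLoop quads items avail head0 tail1 tlen best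
          ∧ pvInv quads base (floop quads items avail head0 tail1 tlen nav best memo').2 := by
      intro items
      induction items with
      | nil => intro best memo' hI hle; rw [floop, gLoop]; exact ⟨rfl, hI⟩
      | cons it rest ihr =>
        intro best memo' hI hle
        obtain ⟨i, a, b, y, x⟩ := it
        by_cases hbrk : best = tlen + nav
        · rw [floop, if_pos hbrk]
          have h1 := gLoop_le quads avail ((i, (a, b, y, x)) :: rest) head0 tail1 tlen best
          have h2 := le_gLoop quads ((i, (a, b, y, x)) :: rest) avail head0 tail1 tlen best
          have h3 : max best (tlen + (pc avail : Int)) = best := by omega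
          rw [h3] at h1
          exact ⟨by simpa using (le_antisymm h2 h1), hI⟩
        · rw [floop, if_neg hbrk, gLoop]
          by_cases hb : (avail >>> i.toNat) &&& 1 = 1
          · rw [dif_pos hb, dif_pos hb]
            dsimp only
            have hlt : avail ^^^ (1 <<< i.toNat) < avail := pvXorPowLt _ _ hb
            have hpcI : ((pc (avail ^^^ (1 <<< i.toNat)) : Int)) + 1 = (pc avail : Int) := by
              exact_mod_cast pcXor _ _ ((pvTestBitIff _ _).mp hb)
            have harg1 : tlen + 1 = base - (pc (avail ^^^ (1 <<< i.toNat)) : Int) := by omega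
            have harg2 : nav - 1 = ((pc (avail ^^^ (1 <<< i.toNat)) : Nat) : Int) := by omega
            have hgle : ∀ h0' t1', gF quads (avail ^^^ (1 <<< i.toNat)) h0' t1' (tlen + 1) ≤ base := by
              intro h0' t1'
              have := gF_le (avail ^^^ (1 <<< i.toNat)) quads h0' t1' (tlen + 1)
              omega
            split_ifs with h1 h2 h3 h4
            · obtain ⟨hv, hI'⟩ := IH _ hlt a tail1 (tlen + 1) (nav - 1) memo' harg1 harg2 hI
              rw [hv]
              exact ihr _ _ hI' (by have := hgle a tail1; omega)
            · obtain ⟨hv, hI'⟩ := IH _ hlt y tail1 (tlen + 1) (nav - 1) memo' harg1 harg2 hI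
              rw [hv]
              exact ihr _ _ hI' (by have := hgle y tail1; omega)
            · obtain ⟨hv, hI'⟩ := IH _ hlt head0 b (tlen + 1) (nav - 1) memo' harg1 harg2 hI
              rw [hv]
              exact ihr _ _ hI' (by have := hgle head0 b; omega)
            · obtain ⟨hv, hI'⟩ := IH _ hlt head0 x (tlen + 1) (nav - 1) memo' harg1 harg2 hI
              rw [hv]
              exact ihr _ _ hI' (by have := hgle head0 x; omega)
            · exact ihr _ _ hI hle
          · rw [dif_neg hb, dif_neg hb]
            exact ihr _ _ hI hle
    rw [faux]
    cases hget : PySem.Dict.get? memo (avail, head0, tail1) with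
    | some v =>
      exact ⟨htlen ▸ hInv _ _ _ _ hget, hInv⟩
    | none =>
      obtain ⟨hv, hI'⟩ := hloop (PySem.List.enumerate quads 0) tlen memo hInv (by omega)
      constructor
      · rw [hv, gF]
      · intro a' h' t' v hv'
        by_cases hk : (a', h', t') = (avail, head0, tail1)
        · have hk' := hk
          simp only [Prod.mk.injEq] at hk'
          obtain ⟨rfl, rfl, rfl⟩ := hk'
          rw [PySem.Dict.get?_insert_self] at hv'
          have hveq : v = (floop quads (PySem.List.enumerate quads 0) a' h' t' tlen nav tlen memo).1 := by
            exact (Option.some.injEq .. ▸ hv').symm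
          rw [hveq, hv, ← htlen, ← gF]
        · rw [PySem.Dict.get?_insert_of_ne _ _ hk] at hv'
          exact hI' _ _ _ _ hv'

-- ---------- top-level loop (tempList empty) ----------

theorem pvTop (s0 : List (List Int)) (hS : ∀ d ∈ s0, 2 ≤ d.length) :
    ∀ (suf pre : List (List Int)), s0 = pre ++ suf →
    ∀ (m : Int) (memo : PySem.Dict (Nat × Int × Int) Int),
      pvInv (s0.map quadOf) ((s0.length : Nat) : Int) memo →
      najdiAux [] pre suf m
        = (tloop (s0.map quadOf) (PySem.List.enumerate (suf.map quadOf) ((pre.length : Nat) : Int))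
            s0.length m memo).1 := by
  intro suf
  induction suf with
  | nil =>
    intro pre hsplit m memo hI
    rw [najdiAux]
    simp [PySem.List.enumerate_nil, tloop]
  | cons d suf' ihs =>
    intro pre hsplit m memo hI
    have hd2 : 2 ≤ d.length := hS d (by rw [hsplit]; simp)
    have hklt : pre.length < s0.length := by rw [hsplit]; simp
    rw [List.map_cons, PySem.List.enumerate_cons]
    have hq : quadOf d = ((PySem.List.pyGet? d 0).getD 0, (PySem.List.pyGet? d 1).getD 0,
        (PySem.List.pyGet? d (-1)).getD 0, (PySem.List.pyGet? d (-2)).getD 0) := rfl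
    rw [hq, tloop]
    have hlen : ((pre.length + (d :: suf').length : Nat) : Int) + ((([] : List (List Int)).length : Nat) : Int)
        = ((s0.length : Nat) : Int) := by
      rw [hsplit]
      push_cast [List.length_append, List.length_cons, List.length_nil]
      ring
    by_cases hbrk : m = ((s0.length : Nat) : Int)
    · rw [najdiAux, if_pos (by rw [hlen]; exact hbrk), if_pos hbrk]
    · rw [najdiAux, if_neg (by rw [hlen]; exact hbrk), if_neg hbrk]
      dsimp only
      -- the bit pre.length is set in the full mask
      have hbitfull : ((1 <<< s0.length) - 1).testBit pre.length = true := by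
        rw [pvTbFull]
        simpa using hklt
      have hlt : ((1 <<< s0.length) - 1) ^^^ (1 <<< pre.length) < (1 <<< s0.length) - 1 :=
        pvXorPowLt _ _ ((pvTestBitIff _ _).mpr hbitfull)
      have hfullpos : 0 < 1 <<< s0.length := by
        simp [Nat.shiftLeft_eq]
      have hltfull : ((1 <<< s0.length) - 1) ^^^ (1 <<< pre.length) < 1 <<< s0.length := by
        omega
      have hpcI : ((pc (((1 <<< s0.length) - 1) ^^^ (1 <<< pre.length)) : Int)) + 1
          = ((s0.length : Nat) : Int) := by
        have := pcXor _ _ hbitfull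
        rw [pcFull] at this
        exact_mod_cast this
      -- the remaining pieces form the selection at the cleared bit
      have hzbyv : pre ++ suf' = selFrom s0 0 (((1 <<< s0.length) - 1) ^^^ (1 <<< pre.length)) := by
        have hzsplit : selFrom s0 0 (((1 <<< s0.length) - 1) ^^^ (1 <<< pre.length))
            = selFrom pre 0 (((1 <<< s0.length) - 1) ^^^ (1 <<< pre.length))
              ++ selFrom (d :: suf') (0 + pre.length) (((1 <<< s0.length) - 1) ^^^ (1 <<< pre.length)) := by
          generalize (((1 <<< s0.length) - 1) ^^^ (1 <<< pre.length)) = A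
          conv_lhs => rw [hsplit]
          exact selFrom_append _ _ _ _
        rw [hzsplit]
        have hpre : selFrom pre 0 (((1 <<< s0.length) - 1) ^^^ (1 <<< pre.length)) = pre := by
          apply selFrom_full
          intro j hj1 hj2
          rw [pvTbXorNe _ _ _ (by simp at hj2; omega), pvTbFull]
          simp at hj2 ⊢
          rw [hsplit]
          simp
          omega
        have hb0 : ((((1 <<< s0.length) - 1) ^^^ (1 <<< pre.length))).testBit pre.length = false := by
          rw [pvTbXorSelf, hbitfull]; rfl
        have hsuf : selFrom suf' (pre.length + 1) (((1 <<< s0.length) - 1) ^^^ (1 <<< pre.length)) = suf' := by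
          apply selFrom_full
          intro j hj1 hj2
          rw [pvTbXorNe _ _ _ (by omega), pvTbFull]
          have : j < s0.length := by
            rw [hsplit]
            simp
            omega
          simpa using this
        rw [hpre, Nat.zero_add]
        simp [selFrom, hb0, hsuf]
      -- A's recursive call is the pure search value
      have hrecA : najdiAux [d] [] (pre ++ suf') ((([d] : List (List Int)).length : Nat) : Int)
          = gF (s0.map quadOf) (((1 <<< s0.length) - 1) ^^^ (1 <<< pre.length))
              ((PySem.List.pyGet? d 0).getD 0) ((PySem.List.pyGet? d 1).getD 0) 1 := by
        have h1len : ((([d] : List (List Int)).length : Nat) : Int) = 1 := by simp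
        have := pvMain s0 hS _ hltfull [d] (by simp)
        rw [najdi, ← hzbyv, h1len] at this
        rw [h1len, this, chH_cons, chT_singleton]
      -- B's faux call computes the same pure value
      obtain ⟨hfv, hI'⟩ := pvMemo (s0.map quadOf) ((s0.length : Nat) : Int)
        (((1 <<< s0.length) - 1) ^^^ (1 <<< pre.length))
        ((PySem.List.pyGet? d 0).getD 0) ((PySem.List.pyGet? d 1).getD 0)
        1 (((s0.length : Nat) : Int) - 1) memo (by omega) (by omega) hI
      rw [show ((pre.length : Nat) : Int).toNat = pre.length by simp] at *
      rw [hrecA]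
      rw [show max m (faux (s0.map quadOf) (((1 <<< s0.length) - 1) ^^^ (1 <<< pre.length))
            ((PySem.List.pyGet? d 0).getD 0) ((PySem.List.pyGet? d 1).getD 0) 1
            (((s0.length : Nat) : Int) - 1) memo).1
          = max (gF (s0.map quadOf) (((1 <<< s0.length) - 1) ^^^ (1 <<< pre.length))
            ((PySem.List.pyGet? d 0).getD 0) ((PySem.List.pyGet? d 1).getD 0) 1) m by
        rw [hfv, max_comm]]
      have := ihs (pre ++ [d]) (by rw [hsplit]; simp) (max (gF (s0.map quadOf)
        (((1 <<< s0.length) - 1) ^^^ (1 <<< pre.length)) ((PySem.List.pyGet? d 0).getD 0)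
        ((PySem.List.pyGet? d 1).getD 0) 1) m)
        (faux (s0.map quadOf) (((1 <<< s0.length) - 1) ^^^ (1 <<< pre.length))
          ((PySem.List.pyGet? d 0).getD 0) ((PySem.List.pyGet? d 1).getD 0) 1
          (((s0.length : Nat) : Int) - 1) memo).2 hI'
      rw [show (pre ++ [d]).length = pre.length + 1 by simp] at this
      rw [show ((pre.length : Nat) : Int) + 1 = (((pre.length + 1 : Nat)) : Int) by push_cast; ring]
      exact this

theorem pvInvEmpty (quads : List (Int × Int × Int × Int)) (base : Int) :
    pvInv quads base PySem.Dict.empty := by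
  intro a h t v hv
  simp [PySem.Dict.get?, PySem.Dict.empty] at hv

-- ===== VERDICT (by name: the statement is the Claim_ definition above) =====
theorem najdi_spec : Claim_equal_najdi := by
  intro s t hDom hPre
  unfold Spec_najdi
  rcases s with _ | ⟨d0, srest⟩
  · simp [najdi, najdiAux, najdi_alt]
  · rcases hPre with hE | ⟨hS, hT⟩
    · exact absurd hE (by simp)
    · have hfullpos : 0 < 1 <<< (d0 :: srest).length := by simp [Nat.shiftLeft_eq]
      rcases t with _ | ⟨th, tts⟩
      · -- tempList empty: the top-level loops walk the same pieces with the same break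
        have htop := pvTop (d0 :: srest) hS (d0 :: srest) [] rfl
          ((([] : List (List Int)).length : Nat) : Int) PySem.Dict.empty
          (pvInvEmpty _ _)
        rw [najdi, najdi_alt]
        exact htop
      · -- tempList nonempty
        have hflt : (1 <<< (d0 :: srest).length) - 1 < 1 <<< (d0 :: srest).length := by omega
        have hsel : selFrom (d0 :: srest) 0 ((1 <<< (d0 :: srest).length) - 1) = d0 :: srest := by
          apply selFrom_full
          intro j hj1 hj2
          rw [pvTbFull]
          simp at hj2 ⊢
          omega
        have hmain := pvMain (d0 :: srest) hS _ hflt (th :: tts) (by simp)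
        rw [hsel, najdi] at hmain
        have hpcf : ((pc ((1 <<< (d0 :: srest).length) - 1) : Nat) : Int)
            = (((d0 :: srest).length : Nat) : Int) := by
          exact_mod_cast pcFull (d0 :: srest).length
        obtain ⟨hfv, _⟩ := pvMemo ((d0 :: srest).map quadOf)
          ((((th :: tts).length : Nat) : Int) + (((d0 :: srest).length : Nat) : Int))
          ((1 <<< (d0 :: srest).length) - 1) (chH (th :: tts)) (chT (th :: tts))
          (((th :: tts).length : Nat) : Int) (((d0 :: srest).length : Nat) : Int)
          PySem.Dict.empty (by omega) (by omega) (pvInvEmpty _ _)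
        rw [najdi, najdi_alt]
        have hmapq : List.map (fun d => ((PySem.List.pyGet? d 0).getD 0, (PySem.List.pyGet? d 1).getD 0,
            (PySem.List.pyGet? d (-1)).getD 0, (PySem.List.pyGet? d (-2)).getD 0)) (d0 :: srest)
            = List.map quadOf (d0 :: srest) := rfl
        rw [hmapq]
        have hchH : (PySem.List.pyGet? th 0).getD 0 = chH (th :: tts) := (chH_cons th tts).symm
        have hchT : (PySem.List.pyGet? ((PySem.List.pyGet? (th :: tts) (-1)).getD []) 1).getD 0
            = chT (th :: tts) := rfl
        rw [hchH, hchT, hfv]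
        exact hmain
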